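-- pv_equiv track=rewrite | github.com/ThomasManche/OthelloGameIA | Othello.py | nombrePion
-- ===== SOURCE A (Python) =====
-- PionBlanc = "B"
--
-- PionNoir = "N"
--
-- def nombrePion(joueur,plat):
--     """
--     Permet d'obtenir le nombre de pion d'un joueur ainsi que le score associé (Si le plateau est vide alors on considère qu'il a 64 pions)
--     """
--     score=0
--     scoreAdversaire=0
--     for i in range(0,len(plat)):
--         for j in range(0,len(plat[i])):
--             if plat[i][j]==joueur:
--                 score+=1
--             elif plat[i][j]==(PionBlanc if joueur==PionNoir else PionNoir):
--                 scoreAdversaire+=1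
--     if scoreAdversaire==0:
--         score=64
--     return score
-- ===== SOURCE B (Python) =====
-- PionBlanc = "B"
--
-- PionNoir = "N"
--
-- def nombrePion(joueur, plat):
--     """Staged library passes: a guard testing opponent absence, then a sum of per-row counts."""
--     adversaire = PionBlanc if joueur == PionNoir else PionNoir
--     if all(c != adversaire for row in plat for c in row):
--         return 64
--     return sum(row.count(joueur) for row in plat)
-- ===== Notes on version B (the rewrite author's own statement) =====
-- stated objective: idiomatic
-- what changed: Replaces A's single nested index loop maintaining two counters by two staged declarative passes: an all() guard testing that no opponent piece exists anywhere, then a sum of per-row list.count(joueur) calls; no accumulator state or branch-per-cell logic remains.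
import Mathlib
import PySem

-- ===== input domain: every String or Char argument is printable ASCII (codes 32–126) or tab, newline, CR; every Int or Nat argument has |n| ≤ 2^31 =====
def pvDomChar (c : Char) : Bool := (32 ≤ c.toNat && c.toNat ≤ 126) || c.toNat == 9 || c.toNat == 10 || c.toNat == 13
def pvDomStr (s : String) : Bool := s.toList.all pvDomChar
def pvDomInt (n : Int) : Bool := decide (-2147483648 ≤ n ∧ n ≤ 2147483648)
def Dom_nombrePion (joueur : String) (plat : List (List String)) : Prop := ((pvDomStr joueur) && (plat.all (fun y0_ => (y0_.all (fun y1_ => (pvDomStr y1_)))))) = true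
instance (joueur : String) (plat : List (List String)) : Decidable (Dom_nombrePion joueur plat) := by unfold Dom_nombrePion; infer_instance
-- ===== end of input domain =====

-- B replaces A's nested index loop with two stateful counters by two staged declarative passes
-- (an all()-guard for opponent absence, then a sum of per-row counts); idiomatic, same cost.

-- ===== PORT A =====
-- for i in range(len(plat)): for j in range(len(plat[i])): … — indices i, j are always in range,
-- so 'pyGetD _ _ default' is exact here (Python never reaches the IndexError case).
def nombrePion (joueur : String) (plat : List (List String)) : Int :=
  let st :=
    (PySem.List.pyRange 0 (PySem.List.len plat)).foldl
      (fun st i =>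
        let row := PySem.List.pyGetD plat i []
        (PySem.List.pyRange 0 (PySem.List.len row)).foldl
          (fun (st : Int × Int) j =>
            let c := PySem.List.pyGetD row j ""
            if c == joueur then (st.1 + 1, st.2)
            else if c == (if joueur == "N" then "B" else "N") then (st.1, st.2 + 1)
            else st) st)
      ((0 : Int), (0 : Int))
  if st.2 == 0 then 64 else st.1

-- ===== PORT B =====
-- all(c != adversaire for row in plat for c in row) → plat.all (row.all …);
-- sum(row.count(joueur) for row in plat) → foldl (+ count) over the rows.
def nombrePion_alt (joueur : String) (plat : List (List String)) : Int :=
  let adversaire := if joueur == "N" then "B" else "N"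
  if plat.all (fun row => row.all (fun c => !(c == adversaire))) then 64
  else plat.foldl (fun acc row => acc + (PySem.List.count row joueur : Int)) 0

-- ===== PRECONDITION & SPEC =====
def Spec_nombrePion (joueur : String) (plat : List (List String)) (out : Int) : Prop := out = nombrePion_alt joueur plat
instance (joueur : String) (plat : List (List String)) (out : Int) : Decidable (Spec_nombrePion joueur plat out) := by unfold Spec_nombrePion; infer_instance

-- ===== CLAIM (what is proved, stated in full; the proofs are below) =====
def Claim_equal_nombrePion : Prop := ∀ (joueur : String) (plat : List (List String)), Dom_nombrePion joueur plat → Spec_nombrePion joueur plat (nombrePion joueur plat)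

-- ===== LEMMAS AND PROOFS =====

-- common closed form: both ports decide on the flattened board's counts
def pvCore (joueur : String) (plat : List (List String)) : Int :=
  let adv := if joueur == "N" then "B" else "N"
  if ((plat.flatten.count adv : Int) == 0) then 64 else (plat.flatten.count joueur : Int)

def pvBody (joueur : String) : Int × Int → String → Int × Int := fun st c =>
  if c == joueur then (st.1 + 1, st.2)
  else if c == (if joueur == "N" then "B" else "N") then (st.1, st.2 + 1)
  else st

lemma pvNe (joueur : String) : joueur ≠ (if joueur == "N" then "B" else "N") := by
  by_cases h : joueur == "N"
  · have hj : joueur = "N" := by simpa using h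
    simp [hj]
  · have hj : joueur ≠ "N" := by simpa using h
    simp [h, hj]

lemma pvA_loop (joueur : String) (plat : List (List String)) :
    List.foldl
      (fun (st : Int × Int) i =>
        List.foldl
          (fun (st : Int × Int) j =>
            pvBody joueur st (PySem.List.pyGetD (PySem.List.pyGetD plat i []) j ""))
          st (PySem.List.pyRange 0 (PySem.List.len (PySem.List.pyGetD plat i []))))
      ((0 : Int), (0 : Int)) (PySem.List.pyRange 0 (PySem.List.len plat))
    = ((plat.flatten.count joueur : Int),
       (plat.flatten.count (if joueur == "N" then "B" else "N") : Int)) := by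
  rw [PySem.List.foldl_congr_mem (PySem.List.pyRange 0 (PySem.List.len plat))
        (fun (st : Int × Int) i =>
          List.foldl
            (fun (st : Int × Int) j =>
              pvBody joueur st (PySem.List.pyGetD (PySem.List.pyGetD plat i []) j ""))
            st (PySem.List.pyRange 0 (PySem.List.len (PySem.List.pyGetD plat i []))))
        (fun (st : Int × Int) i => List.foldl (pvBody joueur) st (PySem.List.pyGetD plat i []))
        ((0 : Int), (0 : Int))
        (fun st i _ => PySem.List.foldl_pyRange_zero_pyGetD (PySem.List.pyGetD plat i []) "" (pvBody joueur) st)]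
  rw [PySem.List.foldl_pyRange_zero_pyGetD plat []
        (fun st row => List.foldl (pvBody joueur) st row) ((0 : Int), (0 : Int))]
  rw [← List.foldl_flatten]
  have hne := pvNe joueur
  have hb : pvBody joueur = fun (st : Int × Int) c =>
      ((if c == joueur then st.1 + 1 else st.1),
       (if c == (if joueur == "N" then "B" else "N") then st.2 + 1 else st.2)) := by
    funext st c
    by_cases h1 : c == joueur
    · have hc : c = joueur := by simpa using h1
      have hne' : ¬ joueur = (if joueur = "N" then "B" else "N") := by simpa using hne
      simp [pvBody, hc, hne']
    · simp only [pvBody, h1, if_false, Bool.false_eq_true]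
      split_ifs <;> simp
  rw [hb]
  rw [PySem.List.foldl_prod_mk
        (f := fun (acc : Int) (c : String) => if c == joueur then acc + 1 else acc)
        (g := fun (acc : Int) (c : String) =>
          if c == (if joueur == "N" then "B" else "N") then acc + 1 else acc)]
  rw [PySem.List.foldl_beq_add_one, PySem.List.foldl_beq_add_one]
  simp

lemma nombrePion_eq_core (joueur : String) (plat : List (List String)) :
    nombrePion joueur plat = pvCore joueur plat := by
  show (if ((List.foldl
      (fun (st : Int × Int) i =>
        List.foldl
          (fun (st : Int × Int) j =>
            pvBody joueur st (PySem.List.pyGetD (PySem.List.pyGetD plat i []) j ""))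
          st (PySem.List.pyRange 0 (PySem.List.len (PySem.List.pyGetD plat i []))))
      ((0 : Int), (0 : Int)) (PySem.List.pyRange 0 (PySem.List.len plat))).2 == 0)
      then (64 : Int)
      else (List.foldl
      (fun (st : Int × Int) i =>
        List.foldl
          (fun (st : Int × Int) j =>
            pvBody joueur st (PySem.List.pyGetD (PySem.List.pyGetD plat i []) j ""))
          st (PySem.List.pyRange 0 (PySem.List.len (PySem.List.pyGetD plat i []))))
      ((0 : Int), (0 : Int)) (PySem.List.pyRange 0 (PySem.List.len plat))).1)
    = pvCore joueur plat
  rw [pvA_loop]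
  simp [pvCore]

lemma pvSum_rows (joueur : String) (plat : List (List String)) :
    plat.foldl (fun acc row => acc + (PySem.List.count row joueur : Int)) 0
      = (plat.flatten.count joueur : Int) := by
  rw [PySem.List.foldl_add]
  induction plat with
  | nil => simp
  | cons r rs ih =>
    simp only [List.map_cons, List.sum_cons, List.flatten_cons, List.count_append,
      PySem.List.count_eq] at *
    push_cast
    omega

lemma pvAll_guard (joueur : String) (plat : List (List String)) :
    plat.all (fun row => row.all (fun c => !(c == (if joueur == "N" then "B" else "N"))))
      = (plat.flatten.count (if joueur == "N" then "B" else "N") == 0) := by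
  rw [Bool.eq_iff_iff]
  simp [List.all_eq_true, List.count_eq_zero, List.mem_flatten]
  exact ⟨fun h x hx hm => h x hx _ hm rfl, fun h x hx y hy he => h x hx (he ▸ hy)⟩

lemma nombrePion_alt_eq_core (joueur : String) (plat : List (List String)) :
    nombrePion_alt joueur plat = pvCore joueur plat := by
  simp only [nombrePion_alt, pvCore, pvAll_guard, pvSum_rows]
  simp

-- ===== VERDICT (by name: the statement is the Claim_ definition above) =====
theorem nombrePion_spec : Claim_equal_nombrePion := by
  intro joueur plat _
  unfold Spec_nombrePion
  rw [nombrePion_eq_core, nombrePion_alt_eq_core]
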